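-- pv_equiv track=rewrite | github.com/MrBrantCode/unitest_baseline | mut_generate/mist_train_cf/cf_41520/solution.py | analyze_license
-- ===== SOURCE A (Python) =====
-- def analyze_license(license_text):
--     permissions = []
--     conditions = []
--
--     keywords = [
--         "software", "documentation", "restriction", "rights", "use", "copy", "modify",
--         "merge", "publish", "distribute", "sublicense", "sell", "permit", "persons", "furnished", "conditions"
--     ]
--
--     for word in license_text.split():
--         if word.lower() in keywords:
--             if word.lower() in ["software", "documentation", "rights", "persons", "furnished"]:
--                 continue
--             if word.lower() in ["restriction", "conditions"]:
--                 conditions.append(word.lower())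
--             else:
--                 permissions.append(word.lower())
--
--     return permissions, conditions
-- ===== SOURCE B (Python) =====
-- # Staged-pass rewrite: lowercase all tokens once, then build each bucket by its
-- # own independent filter pass (no shared loop, no nested branching).
-- _PERMISSION_WORDS = frozenset(
--     ("use", "copy", "modify", "merge", "publish", "distribute",
--      "sublicense", "sell", "permit"))
-- _CONDITION_WORDS = frozenset(("restriction", "conditions"))
--
-- def analyze_license(license_text):
--     words = [w.lower() for w in license_text.split()]
--     permissions = [w for w in words if w in _PERMISSION_WORDS]
--     conditions = [w for w in words if w in _CONDITION_WORDS]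
--     return permissions, conditions
-- ===== Notes on version B (the rewrite author's own statement) =====
-- stated objective: simpler
-- what changed: Replaced A's single loop with three levels of nested membership branching by a staged pipeline: one map that lowercases all tokens, then two independent filter passes, one per bucket (permission set and condition set); the ignore list disappears entirely.
import Mathlib
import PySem

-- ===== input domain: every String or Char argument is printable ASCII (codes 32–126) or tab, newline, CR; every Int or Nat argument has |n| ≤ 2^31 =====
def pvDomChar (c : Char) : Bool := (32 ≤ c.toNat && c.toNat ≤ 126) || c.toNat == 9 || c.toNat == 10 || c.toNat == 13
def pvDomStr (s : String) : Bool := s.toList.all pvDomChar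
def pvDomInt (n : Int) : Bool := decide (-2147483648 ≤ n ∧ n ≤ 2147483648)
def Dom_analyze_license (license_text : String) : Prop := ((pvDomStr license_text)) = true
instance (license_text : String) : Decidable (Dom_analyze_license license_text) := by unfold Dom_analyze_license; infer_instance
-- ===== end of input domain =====

-- B replaces A's single loop with nested membership branching by a staged pipeline
-- (lowercase map, then one filter pass per bucket); objective: simpler.

-- ===== PORT A =====
def analyze_license (license_text : String) : List String × List String :=
  let keywords : List String :=
    ["software", "documentation", "restriction", "rights", "use", "copy", "modify",
     "merge", "publish", "distribute", "sublicense", "sell", "permit", "persons", "furnished", "conditions"]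
  (PySem.Str.split₀ license_text).foldl
    (fun st word =>
      if keywords.contains (PySem.Str.lower word) then
        if (["software", "documentation", "rights", "persons", "furnished"] : List String).contains (PySem.Str.lower word) then
          st
        else if (["restriction", "conditions"] : List String).contains (PySem.Str.lower word) then
          (st.1, st.2 ++ [PySem.Str.lower word])
        else
          (st.1 ++ [PySem.Str.lower word], st.2)
      else st)
    ([], [])

-- ===== PORT B =====
def licensePermWords : List String :=
  ["use", "copy", "modify", "merge", "publish", "distribute", "sublicense", "sell", "permit"]
def licenseCondWords : List String := ["restriction", "conditions"]

def analyze_license_alt (license_text : String) : List String × List String :=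
  let words := (PySem.Str.split₀ license_text).map PySem.Str.lower
  (words.filter (fun w => licensePermWords.contains w),
   words.filter (fun w => licenseCondWords.contains w))

-- ===== PRECONDITION & SPEC =====
def Spec_analyze_license (license_text : String) (out : List String × List String) : Prop := out = analyze_license_alt license_text
instance (license_text : String) (out : List String × List String) : Decidable (Spec_analyze_license license_text out) := by unfold Spec_analyze_license; infer_instance

-- ===== CLAIM (what is proved, stated in full; the proofs are below) =====
def Claim_equal_analyze_license : Prop := ∀ (license_text : String), Dom_analyze_license license_text → Spec_analyze_license license_text (analyze_license license_text)

-- ===== LEMMAS AND PROOFS =====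

-- A's per-word step, named for the lemmas below
def licenseStepA (st : List String × List String) (word : String) : List String × List String :=
  if (["software", "documentation", "restriction", "rights", "use", "copy", "modify",
       "merge", "publish", "distribute", "sublicense", "sell", "permit", "persons", "furnished", "conditions"] : List String).contains (PySem.Str.lower word) then
    if (["software", "documentation", "rights", "persons", "furnished"] : List String).contains (PySem.Str.lower word) then
      st
    else if (["restriction", "conditions"] : List String).contains (PySem.Str.lower word) then
      (st.1, st.2 ++ [PySem.Str.lower word])
    else
      (st.1 ++ [PySem.Str.lower word], st.2)
  else st

-- A's step appends to each component exactly what B's two filters contribute for this word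
theorem licenseStepA_eq (st : List String × List String) (word : String) :
    licenseStepA st word =
      (st.1 ++ (if licensePermWords.contains (PySem.Str.lower word) then [PySem.Str.lower word] else []),
       st.2 ++ (if licenseCondWords.contains (PySem.Str.lower word) then [PySem.Str.lower word] else [])) := by
  unfold licenseStepA licensePermWords licenseCondWords
  generalize PySem.Str.lower word = lw
  by_cases h : lw ∈ (["software", "documentation", "restriction", "rights", "use", "copy", "modify",
      "merge", "publish", "distribute", "sublicense", "sell", "permit", "persons", "furnished", "conditions"] : List String)
  · simp only [List.mem_cons, List.not_mem_nil, or_false] at h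
    rcases h with rfl|rfl|rfl|rfl|rfl|rfl|rfl|rfl|rfl|rfl|rfl|rfl|rfl|rfl|rfl|rfl <;> simp
  · simp only [List.mem_cons, List.not_mem_nil, or_false, not_or] at h
    obtain ⟨h1,h2,h3,h4,h5,h6,h7,h8,h9,h10,h11,h12,h13,h14,h15,h16⟩ := h
    simp [h1,h2,h3,h4,h5,h6,h7,h8,h9,h10,h11,h12,h13,h14,h15,h16]

-- the fold over A's step equals the two staged filter passes, for any start state
theorem licenseFoldA_eq (l : List String) (p c : List String) :
    l.foldl licenseStepA (p, c) =
      (p ++ (l.map PySem.Str.lower).filter (fun w => licensePermWords.contains w),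
       c ++ (l.map PySem.Str.lower).filter (fun w => licenseCondWords.contains w)) := by
  induction l generalizing p c with
  | nil => simp
  | cons w ws ih =>
    rw [List.foldl_cons, licenseStepA_eq, ih]
    simp only [List.map_cons, List.filter_cons]
    by_cases hp : PySem.Str.lower w ∈ licensePermWords <;>
      by_cases hc : PySem.Str.lower w ∈ licenseCondWords <;>
        simp [hp, hc]

-- ===== VERDICT (by name: the statement is the Claim_ definition above) =====
theorem analyze_license_spec : Claim_equal_analyze_license := by
  intro license_text _
  unfold Spec_analyze_license analyze_license analyze_license_alt
  exact licenseFoldA_eq (PySem.Str.split₀ license_text) [] []
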